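-- pv_equiv track=rewrite | github.com/dbalatoni13/nfsmw | tools/decomp-context.py | compact_dwarf_function_text
-- ===== SOURCE A (Python) =====
-- from typing import Any, Dict, List, Optional, Tuple
--
-- def compact_dwarf_function_text(text: str) -> str:
--     lines = [line.rstrip() for line in text.splitlines()]
--     kept: List[str] = []
--     signature = None
--
--     for line in lines:
--         stripped = line.strip()
--         if not stripped:
--             continue
--         if stripped.startswith("//"):
--             if stripped.startswith("// Range:") or stripped.startswith("// this:"):
--                 kept.append(line)
--             continue
--         signature = line
--         break
--
--     if signature is not None:
--         kept.append(signature)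
--
--     return "\n".join(kept) if kept else text
-- ===== SOURCE B (Python) =====
-- def _compact(lines):
--     # Structural recursion over the lines: result built from the tail's result,
--     # no accumulator, no break, no signature variable.
--     if not lines:
--         return []
--     head = lines[0].rstrip()
--     s = head.strip()
--     if not s:
--         return _compact(lines[1:])
--     if s.startswith("//"):
--         tail = _compact(lines[1:])
--         return [head] + tail if s.startswith(("// Range:", "// this:")) else tail
--     return [head]
--
--
-- def compact_dwarf_function_text(text: str) -> str:
--     kept = _compact(text.splitlines())
--     return "\n".join(kept) if kept else text
-- ===== Notes on version B (the rewrite author's own statement) =====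
-- stated objective: alternative
-- what changed: A is an imperative single pass with an accumulator list, a signature variable and a break, rstripping all lines up front; B is a structural recursion that rstrips each head as it goes and assembles the kept lines from the tail's recursive result, with no accumulator or loop state.
import Mathlib
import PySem

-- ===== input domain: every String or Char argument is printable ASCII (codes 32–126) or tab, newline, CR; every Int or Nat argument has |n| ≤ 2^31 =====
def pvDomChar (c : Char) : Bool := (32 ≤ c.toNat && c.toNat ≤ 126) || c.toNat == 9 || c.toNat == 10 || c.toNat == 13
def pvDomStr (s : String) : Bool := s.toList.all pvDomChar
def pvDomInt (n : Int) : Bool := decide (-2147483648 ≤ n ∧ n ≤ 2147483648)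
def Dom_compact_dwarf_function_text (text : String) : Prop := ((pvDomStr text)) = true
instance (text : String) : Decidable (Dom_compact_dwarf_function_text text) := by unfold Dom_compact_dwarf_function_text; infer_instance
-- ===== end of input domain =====

-- B replaces A's stateful loop (accumulator, break, signature variable) by a structural recursion
-- that builds the kept lines from the tail's result; same values, no speed claim.

-- ===== PORT A =====
-- A's for-loop with break: state is (kept, signature); returns (kept, none) if the loop exhausts lines.
def pvALoop : List String → List String → List String × Option String
  | [], kept => (kept, none)
  | line :: rest, kept =>
    let stripped := PySem.Str.strip line
    if stripped = "" then pvALoop rest kept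
    else if PySem.Str.startswith stripped "//" then
      if PySem.Str.startswith stripped "// Range:" || PySem.Str.startswith stripped "// this:" then
        pvALoop rest (kept ++ [line])
      else pvALoop rest kept
    else (kept, some line)

def compact_dwarf_function_text (text : String) : String :=
  let lines := (PySem.Str.splitlines text).map PySem.Str.rstrip
  let r := pvALoop lines []
  let kept := match r.2 with
    | some sig => r.1 ++ [sig]
    | none => r.1
  if kept = [] then text else PySem.Str.join "\n" kept

-- ===== PORT B =====
-- B's recursive helper _compact: rstrips the head, decides, and prepends to the tail's result.
def pvBRec : List String → List String
  | [] => []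
  | l :: rest =>
    let head := PySem.Str.rstrip l
    let s := PySem.Str.strip head
    if s = "" then pvBRec rest
    else if PySem.Str.startswith s "//" then
      if PySem.Str.startswith s "// Range:" || PySem.Str.startswith s "// this:" then
        head :: pvBRec rest
      else pvBRec rest
    else [head]

def compact_dwarf_function_text_alt (text : String) : String :=
  let kept := pvBRec (PySem.Str.splitlines text)
  if kept = [] then text else PySem.Str.join "\n" kept

-- ===== PRECONDITION & SPEC =====
def Spec_compact_dwarf_function_text (text : String) (out : String) : Prop := out = compact_dwarf_function_text_alt text
instance (text : String) (out : String) : Decidable (Spec_compact_dwarf_function_text text out) := by unfold Spec_compact_dwarf_function_text; infer_instance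

-- ===== CLAIM (what is proved, stated in full; the proofs are below) =====
def Claim_equal_compact_dwarf_function_text : Prop := ∀ (text : String), Dom_compact_dwarf_function_text text → Spec_compact_dwarf_function_text text (compact_dwarf_function_text text)

-- ===== LEMMAS AND PROOFS =====

-- A's loop over the pre-rstripped lines, with the optional signature appended, yields exactly
-- kept ++ (B's recursion over the raw lines).
lemma pvLoopEqRec (lines : List String) : ∀ kept,
    (pvALoop (lines.map PySem.Str.rstrip) kept).1
      ++ (pvALoop (lines.map PySem.Str.rstrip) kept).2.toList
    = kept ++ pvBRec lines := by
  induction lines with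
  | nil => intro kept; simp [pvALoop, pvBRec]
  | cons l rest ih =>
    intro kept
    by_cases h0 : PySem.Str.strip (PySem.Str.rstrip l) = ""
    · simp [pvALoop, pvBRec, h0, ih]
    · by_cases h1 : PySem.Chars.startswith (PySem.Chars.strip (PySem.Chars.rstrip l.toList)) ['/', '/'] = true
      · by_cases h2 : PySem.Chars.startswith (PySem.Chars.strip (PySem.Chars.rstrip l.toList)) ['/', '/', ' ', 'R', 'a', 'n', 'g', 'e', ':'] = true
        · simp [pvALoop, pvBRec, h0, h1, h2, ih]
        · by_cases h3 : PySem.Chars.startswith (PySem.Chars.strip (PySem.Chars.rstrip l.toList)) ['/', '/', ' ', 't', 'h', 'i', 's', ':'] = true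
          · simp [pvALoop, pvBRec, h0, h1, h2, h3, ih]
          · simp only [Bool.not_eq_true] at h2 h3
            simp [pvALoop, pvBRec, h0, h1, h2, h3, ih]
      · simp only [Bool.not_eq_true] at h1
        simp [pvALoop, pvBRec, h0, h1]

-- ===== VERDICT (by name: the statement is the Claim_ definition above) =====
theorem compact_dwarf_function_text_spec : Claim_equal_compact_dwarf_function_text := by
  intro text _
  unfold Spec_compact_dwarf_function_text compact_dwarf_function_text compact_dwarf_function_text_alt
  have h := pvLoopEqRec (PySem.Str.splitlines text) []
  simp only [List.nil_append] at h
  dsimp only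
  rcases hr : (pvALoop ((PySem.Str.splitlines text).map PySem.Str.rstrip) []).2 with _ | sig
  · rw [hr] at h; simp only [Option.toList_none, List.append_nil] at h
    simp [hr, h]
  · rw [hr] at h; simp only [Option.toList_some] at h
    simp [hr, h]
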